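-- pv_equiv track=rewrite | github.com/Rahulllkumarrr/KickStart | KickStart 2018 Practise round/sums.py | sub_lists
-- ===== SOURCE A (Python) =====
-- def sub_lists(my_list):
--     subs = []
--
--     for i in range(len(my_list)):
--         n = i + 1
--         while n <= len(my_list):
--             sub=my_list[i:n]
--             sub = [int(i) for i in my_list[i:n]]
--             total=sum(sub)
--             subs.append(total)
--             n=n+1
--     return subs
-- ===== SOURCE B (Python) =====
-- def sub_lists(my_list):
--     pre = [0]
--     total = 0
--     for x in my_list:
--         total += x
--         pre.append(total)
--     L = len(my_list)
--     return [pre[n] - pre[i] for i in range(L) for n in range(i + 1, L + 1)]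
-- ===== Notes on version B (the rewrite author's own statement) =====
-- stated objective: faster
-- what changed: B builds a prefix-sum array once and emits each contiguous-sublist sum as a difference of two prefix sums, replacing A's per-sublist slice-copy-and-sum inner pass.
import Mathlib
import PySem

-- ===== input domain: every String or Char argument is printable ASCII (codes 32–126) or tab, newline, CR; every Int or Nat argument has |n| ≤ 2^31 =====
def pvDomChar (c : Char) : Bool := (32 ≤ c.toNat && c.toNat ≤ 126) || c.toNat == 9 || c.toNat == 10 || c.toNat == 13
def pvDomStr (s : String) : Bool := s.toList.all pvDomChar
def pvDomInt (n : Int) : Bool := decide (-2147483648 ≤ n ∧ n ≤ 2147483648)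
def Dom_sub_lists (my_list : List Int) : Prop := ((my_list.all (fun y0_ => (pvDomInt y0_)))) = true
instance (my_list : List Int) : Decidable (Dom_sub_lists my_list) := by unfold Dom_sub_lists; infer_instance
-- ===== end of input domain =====

-- B replaces A's per-sublist slice-and-sum inner pass by a prefix-sum table built once,
-- each sublist sum becoming a difference of two prefix sums (objective: faster).


-- ===== PORT A =====
-- the inner 'while n <= len(my_list): …' loop of A
def subListsWhile (my_list : List Int) (i : Nat) (n : Nat) (subs : List Int) : List Int :=
  if n ≤ my_list.length then
    -- sub = my_list[i:n]; sub = [int(i) for i in my_list[i:n]]  (int on an int is the identity)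
    subListsWhile my_list i (n + 1)
      (subs ++ [((PySem.List.slice my_list (some (i : Int)) (some (n : Int))).map (fun x => x)).sum])
  else subs
termination_by my_list.length + 1 - n

def sub_lists (my_list : List Int) : List Int :=
  (List.range my_list.length).foldl (fun subs i => subListsWhile my_list i (i + 1) subs) []

-- ===== PORT B =====
-- the loop building pre = [0, x0, x0+x1, …] together with the running total
def altPrefix (my_list : List Int) : List Int :=
  (my_list.foldl (fun (p : List Int × Int) x => (p.1 ++ [p.2 + x], p.2 + x)) ([0], 0)).1

def sub_lists_alt (my_list : List Int) : List Int :=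
  let pre := altPrefix my_list
  let L := my_list.length
  (List.range L).flatMap (fun i =>
    (List.range' (i + 1) (L - i)).map (fun n => pre.getD n 0 - pre.getD i 0))

-- ===== PRECONDITION & SPEC =====
def Spec_sub_lists (my_list : List Int) (out : List Int) : Prop := out = sub_lists_alt my_list
instance (my_list : List Int) (out : List Int) : Decidable (Spec_sub_lists my_list out) := by unfold Spec_sub_lists; infer_instance

-- ===== CLAIM (what is proved, stated in full; the proofs are below) =====
def Claim_equal_sub_lists : Prop := ∀ (my_list : List Int), Dom_sub_lists my_list → Spec_sub_lists my_list (sub_lists my_list)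

-- ===== LEMMAS AND PROOFS =====

-- the prefix-building fold, characterised
theorem altPrefix_fold (l : List Int) : ∀ (p : List Int) (s : Int),
    (l.foldl (fun (q : List Int × Int) x => (q.1 ++ [q.2 + x], q.2 + x)) (p, s)).1
      = p ++ (List.range l.length).map (fun k => s + (l.take (k + 1)).sum) := by
  induction l with
  | nil => intro p s; simp
  | cons x xs ih =>
    intro p s
    simp only [List.foldl_cons, ih, List.length_cons, List.range_succ_eq_map, List.map_cons,
      List.map_map]
    simp [List.append_assoc, Function.comp, add_assoc]

theorem altPrefix_getD (l : List Int) (k : Nat) (hk : k ≤ l.length) :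
    (altPrefix l).getD k 0 = (l.take k).sum := by
  unfold altPrefix
  rw [altPrefix_fold]
  cases k with
  | zero => simp
  | succ m =>
    have hm : m < l.length := by omega
    rw [List.getD_eq_getElem?_getD]
    simp [hm]

theorem slice_sum (l : List Int) (i n : Nat) (hin : i ≤ n) :
    ((PySem.List.slice l (some (i : Int)) (some (n : Int))).map (fun x => x)).sum
      = (l.take n).sum - (l.take i).sum := by
  rw [PySem.List.slice_natCast, List.map_id_fun']
  have h : l.take n = l.take i ++ (l.drop i).take (n - i) := by
    conv_lhs => rw [show n = i + (n - i) by omega]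
    exact List.take_add
  rw [h, List.sum_append]
  simp

theorem subListsWhile_eq (l : List Int) (i : Nat) : ∀ (fuel n : Nat) (subs : List Int),
    fuel = l.length + 1 - n →
    subListsWhile l i n subs
      = subs ++ (List.range' n (l.length + 1 - n)).map
          (fun (m : Nat) => ((PySem.List.slice l (some (i : Int)) (some (m : Int))).map (fun x => x)).sum) := by
  intro fuel
  induction fuel with
  | zero =>
    intro n subs hf
    rw [subListsWhile]
    have : ¬ n ≤ l.length := by omega
    simp [this, show l.length + 1 - n = 0 by omega]
  | succ f ih =>
    intro n subs hf
    rw [subListsWhile]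
    by_cases h : n ≤ l.length
    · simp only [if_pos h]
      rw [ih (n + 1) _ (by omega)]
      rw [show l.length + 1 - n = (l.length - n) + 1 by omega, List.range'_succ]
      simp [show l.length + 1 - (n + 1) = l.length - n by omega, List.append_assoc]
    · simp [h, show l.length + 1 - n = 0 by omega]

theorem foldl_append_blocks {α : Type} (g : Nat → List α) (l : List Nat) :
    ∀ (init : List α), l.foldl (fun acc i => acc ++ g i) init = init ++ l.flatMap g := by
  induction l with
  | nil => intro init; simp
  | cons x xs ih => intro init; simp [ih, List.append_assoc]

-- ===== VERDICT (by name: the statement is the Claim_ definition above) =====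
theorem sub_lists_spec : Claim_equal_sub_lists := by
  intro l _
  unfold Spec_sub_lists sub_lists sub_lists_alt
  rw [show (fun subs i => subListsWhile l i (i + 1) subs)
      = (fun (subs : List Int) i => subs ++ (List.range' (i + 1) (l.length + 1 - (i + 1))).map
          (fun (m : Nat) => ((PySem.List.slice l (some (i : Int)) (some (m : Int))).map (fun x => x)).sum))
    from funext fun subs => funext fun i => subListsWhile_eq l i _ (i + 1) subs rfl]
  rw [foldl_append_blocks]
  simp only [List.nil_append]
  apply List.flatMap_congr
  intro i hi
  have hiL : i < l.length := List.mem_range.mp hi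
  rw [show l.length + 1 - (i + 1) = l.length - i by omega]
  apply List.map_congr_left
  intro m hm
  rw [List.mem_range'_1] at hm
  rw [slice_sum l i m (by omega),
      altPrefix_getD l m (by omega), altPrefix_getD l i (by omega)]
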